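-- pv_equiv track=rewrite | github.com/aiviaghost/Kattis_solutions | rationalsequence3.py | get_pq
-- ===== SOURCE A (Python) =====
-- def get_pq(N):
--     if N == 1:
--         return 1, 1
--     else:
--         p, q = get_pq(N // 2)
--         if (N & 1) == 0:
--             return p, p + q
--         else:
--             return p + q, q
-- ===== SOURCE B (Python) =====
-- def get_pq(N):
--     bits = []
--     while N != 1:
--         bits.append(N & 1)
--         N //= 2
--     p, q = 1, 1
--     for b in reversed(bits):
--         if b == 0:
--             p, q = p, p + q
--         else:
--             p, q = p + q, q
--     return p, q
-- ===== Notes on version B (the rewrite author's own statement) =====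
-- stated objective: alternative
-- what changed: Replaces the top-down recursion by an iterative pass: collect N's bits bottom-up with a while loop, then replay them in reverse with a fold starting from (1,1).
-- outside the precondition, e.g. on get_pq(0): A raises RecursionError, B does not finish within the time limit
import Mathlib
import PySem

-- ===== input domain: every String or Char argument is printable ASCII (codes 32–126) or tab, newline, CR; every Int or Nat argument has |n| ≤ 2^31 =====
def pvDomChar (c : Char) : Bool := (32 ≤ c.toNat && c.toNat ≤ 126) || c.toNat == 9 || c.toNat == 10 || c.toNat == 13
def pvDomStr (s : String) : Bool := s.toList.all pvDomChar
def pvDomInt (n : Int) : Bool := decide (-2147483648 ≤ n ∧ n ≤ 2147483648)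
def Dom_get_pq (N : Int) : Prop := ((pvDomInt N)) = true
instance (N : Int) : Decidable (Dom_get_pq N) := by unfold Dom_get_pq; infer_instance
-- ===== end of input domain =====

-- B replaces A's top-down recursion by an iterative bit-collection loop plus a reverse replay fold (alternative decomposition, same cost).

-- ===== PORT A =====
-- A's recursion on N // 2; fuel N.toNat only makes the recursion total in Lean
-- (for 1 ≤ N the depth is ≤ N.toNat, so the fuel is never the reason a branch is taken).
def getPqFuel : Nat → Int → Int × Int
  | 0, _ => (1, 1)
  | f + 1, N =>
    if N = 1 then (1, 1)
    else
      let pq := getPqFuel f (PySem.Int.floordiv N 2)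
      if PySem.Int.band N 1 = 0 then (pq.1, pq.1 + pq.2) else (pq.1 + pq.2, pq.2)

def get_pq (N : Int) : Int × Int := getPqFuel N.toNat N

-- ===== PORT B =====
-- the while loop of Source B: bits.append(N & 1); N //= 2   (fuel N.toNat for totality only)
def collectBits : Nat → Int → List Int
  | 0, _ => []
  | f + 1, N =>
    if N = 1 then []
    else PySem.Int.band N 1 :: collectBits f (PySem.Int.floordiv N 2)

-- the body of Source B's for loop over reversed(bits)
def cwStep (pq : Int × Int) (b : Int) : Int × Int :=
  if b = 0 then (pq.1, pq.1 + pq.2) else (pq.1 + pq.2, pq.2)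

def get_pq_alt (N : Int) : Int × Int :=
  (collectBits N.toNat N).reverse.foldl cwStep (1, 1)

-- ===== PRECONDITION & SPEC =====
-- Pre_ excludes N ≤ 0, where the Python A never returns (RecursionError from infinite recursion).
def Pre_get_pq (N : Int) : Prop := 1 ≤ N
instance (N : Int) : Decidable (Pre_get_pq N) := by unfold Pre_get_pq; infer_instance
def pvWitness_get_pq : Int := 5

def Spec_get_pq (N : Int) (out : Int × Int) : Prop := out = get_pq_alt N
instance (N : Int) (out : Int × Int) : Decidable (Spec_get_pq N out) := by unfold Spec_get_pq; infer_instance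

-- ===== CLAIM (what is proved, stated in full; the proofs are below) =====
def Claim_equal_get_pq : Prop := ∀ (N : Int), Dom_get_pq N → Pre_get_pq N → Spec_get_pq N (get_pq N)

-- ===== LEMMAS AND PROOFS =====

theorem getPqFuel_eq_fold (f : Nat) : ∀ (g : Nat) (N : Int), 1 ≤ N → N.toNat ≤ f → N.toNat ≤ g →
    getPqFuel f N = (collectBits g N).reverse.foldl cwStep (1, 1) := by
  induction f with
  | zero => intro g N h1 hf _; omega
  | succ f ih =>
    intro g N h1 hf hg
    cases g with
    | zero => omega
    | succ g =>
      by_cases hN : N = 1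
      · simp [getPqFuel, collectBits, hN]
      · have h2 : 2 ≤ N := by omega
        have hfd : PySem.Int.floordiv N 2 = N / 2 := PySem.Int.floordiv_eq_ediv_of_pos (by omega)
        have hM1 : 1 ≤ N / 2 := by omega
        have hMlt : (N / 2).toNat < N.toNat := by omega
        have hrec := ih g (N / 2) hM1 (by omega) (by omega)
        simp only [getPqFuel, collectBits, hN, if_false, hfd, List.reverse_cons,
          List.foldl_append, List.foldl_cons, List.foldl_nil, hrec]
        by_cases hb : PySem.Int.band N 1 = 0 <;> simp [cwStep, hb]

-- ===== VERDICT (by name: the statement is the Claim_ definition above) =====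
theorem get_pq_spec : Claim_equal_get_pq := by
  intro N _ hpre
  unfold Spec_get_pq get_pq get_pq_alt
  exact getPqFuel_eq_fold N.toNat N.toNat N hpre le_rfl le_rfl
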